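-- pv_equiv track=rewrite | github.com/ZhenyanLuo/Apsi-diagnostic | SOG_primalscheme.py | count_gaps_before_nucleotide
-- ===== SOURCE A (Python) =====
-- def count_gaps_before_nucleotide(sequence):
--     gap_count = 0
--     for char in sequence:
--         if char == '-':
--             gap_count += 1
--         elif char in 'ATCGU':
--             break
--     return gap_count
-- ===== SOURCE B (Python) =====
-- def count_gaps_before_nucleotide(sequence):
--     idx = len(sequence)
--     for i, ch in enumerate(sequence):
--         if ch in 'ATCGU':
--             idx = i
--             break
--     return sequence[:idx].count('-')
-- ===== Notes on version B (the rewrite author's own statement) =====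
-- stated objective: alternative
-- what changed: B first locates the index of the first nucleotide character (whole length if none), then counts gap characters in that prefix slice with str.count, instead of A's single loop with an inline gap accumulator and break.
import Mathlib
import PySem

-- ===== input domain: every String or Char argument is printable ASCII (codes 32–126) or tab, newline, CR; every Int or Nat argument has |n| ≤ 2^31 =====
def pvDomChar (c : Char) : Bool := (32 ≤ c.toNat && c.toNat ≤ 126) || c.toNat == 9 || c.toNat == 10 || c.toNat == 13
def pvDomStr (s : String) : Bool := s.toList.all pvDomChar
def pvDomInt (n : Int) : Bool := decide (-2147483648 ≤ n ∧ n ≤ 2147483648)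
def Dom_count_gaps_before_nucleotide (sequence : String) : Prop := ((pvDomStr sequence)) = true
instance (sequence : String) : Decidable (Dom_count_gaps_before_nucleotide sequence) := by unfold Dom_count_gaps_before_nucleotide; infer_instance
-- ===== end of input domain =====

-- B separates boundary-finding from gap-counting (alternative decomposition; same cost).
-- ===== PORT A =====
-- loop 'for char in sequence: if char=='-': gap_count+=1 elif char in 'ATCGU': break'
def pvLoopA : List Char → Int → Int
  | [], g => g
  | c :: cs, g =>
    if c = '-' then pvLoopA cs (g + 1)
    else if c ∈ "ATCGU".toList then g
    else pvLoopA cs g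

def count_gaps_before_nucleotide (sequence : String) : Int :=
  pvLoopA sequence.toList 0

-- ===== PORT B =====
-- 'for i, ch in enumerate(sequence): if ch in 'ATCGU': idx = i; break' (idx defaults to len)
def pvFirstNuc : List Char → Nat
  | [] => 0
  | c :: cs => if c ∈ "ATCGU".toList then 0 else 1 + pvFirstNuc cs

def count_gaps_before_nucleotide_alt (sequence : String) : Int :=
  ((sequence.toList.take (pvFirstNuc sequence.toList)).count '-' : Int)

-- ===== PRECONDITION & SPEC =====
def Spec_count_gaps_before_nucleotide (sequence : String) (out : Int) : Prop := out = count_gaps_before_nucleotide_alt sequence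
instance (sequence : String) (out : Int) : Decidable (Spec_count_gaps_before_nucleotide sequence out) := by unfold Spec_count_gaps_before_nucleotide; infer_instance

-- ===== CLAIM (what is proved, stated in full; the proofs are below) =====
def Claim_equal_count_gaps_before_nucleotide : Prop := ∀ (sequence : String), Dom_count_gaps_before_nucleotide sequence → Spec_count_gaps_before_nucleotide sequence (count_gaps_before_nucleotide sequence)

-- ===== LEMMAS AND PROOFS =====

theorem pvLoopA_eq (cs : List Char) : ∀ g : Int,
    pvLoopA cs g = g + ((cs.take (pvFirstNuc cs)).count '-' : Int) := by
  induction cs with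
  | nil => intro g; simp [pvLoopA, pvFirstNuc]
  | cons c cs ih =>
    intro g
    by_cases hn : c = 'A' ∨ c = 'T' ∨ c = 'C' ∨ c = 'G' ∨ c = 'U'
    · have hd : c ≠ '-' := by rcases hn with h|h|h|h|h <;> simp [h]
      simp [pvLoopA, pvFirstNuc, hd, hn]
    · by_cases hd : c = '-'
      · subst hd
        simp [pvLoopA, pvFirstNuc, ih, Nat.add_comm 1 (pvFirstNuc cs)]
        ring
      · simp [pvLoopA, pvFirstNuc, hn, hd, ih, Nat.add_comm 1 (pvFirstNuc cs)]

-- ===== VERDICT (by name: the statement is the Claim_ definition above) =====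
theorem count_gaps_before_nucleotide_spec : Claim_equal_count_gaps_before_nucleotide := by
  intro s _
  unfold Spec_count_gaps_before_nucleotide count_gaps_before_nucleotide count_gaps_before_nucleotide_alt
  simpa using pvLoopA_eq s.toList 0
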